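-- pv_equiv track=rewrite | github.com/rafaelperazzo/programacao-web | moodledata/vpl_data/86/usersdata/191/58466/submittedfiles/pico.py | pico
-- ===== SOURCE A (Python) =====
-- def pico(b):
--     for i in range(1,(len(b)//2)+1,1):
--         if b[i]<b[i-1]:
--             return False
--         else:
--             for i in range((len(b)//2)+1,len(b),1):
--                 if b[i]>b[i-1]:
--                     return False
--     return True
-- ===== SOURCE B (Python) =====
-- def pico(b):
--     n = len(b)
--     half = n // 2
--     for i in range(1, half + 1):
--         if b[i] < b[i - 1]:
--             return False
--     for j in range(half + 1, n):
--         if b[j] > b[j - 1]: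
--             return False
--     return True
-- ===== Notes on version B (the rewrite author's own statement) =====
-- stated objective: faster
-- what changed: Replaced A's nested loop, which re-scans the whole descending half on every ascending step, with two flat sequential passes (ascending half, then descending half).
import Mathlib
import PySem

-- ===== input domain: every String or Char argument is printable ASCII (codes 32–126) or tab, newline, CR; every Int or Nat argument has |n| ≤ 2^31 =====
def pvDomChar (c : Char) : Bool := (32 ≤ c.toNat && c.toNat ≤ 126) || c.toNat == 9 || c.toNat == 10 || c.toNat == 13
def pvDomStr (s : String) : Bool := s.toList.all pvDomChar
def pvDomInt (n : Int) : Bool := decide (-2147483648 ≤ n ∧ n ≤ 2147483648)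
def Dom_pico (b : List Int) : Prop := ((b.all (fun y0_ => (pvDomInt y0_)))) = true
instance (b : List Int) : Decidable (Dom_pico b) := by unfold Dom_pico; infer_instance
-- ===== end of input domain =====

-- B replaces A's nested loop (which re-scans the whole descending half on every
-- ascending step) with two flat sequential passes; same return value everywhere.

-- ===== PORT A =====
-- Indices produced by the ranges are always within bounds, so pyGetD _ _ 0 is exact here.
-- inner loop: for i in range(len(b)//2+1, len(b), 1): if b[i] > b[i-1]: return False
def picoInnerA (b : List Int) : List Int → Bool
  | [] => true
  | i :: is =>
    if PySem.List.pyGetD b i 0 > PySem.List.pyGetD b (i - 1) 0 then false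
    else picoInnerA b is

-- outer loop: for i in range(1, len(b)//2+1, 1): if b[i] < b[i-1]: return False else <inner loop>
def picoOuterA (b : List Int) : List Int → Bool
  | [] => true
  | i :: is =>
    if PySem.List.pyGetD b i 0 < PySem.List.pyGetD b (i - 1) 0 then false
    else if picoInnerA b (PySem.List.pyRange ((b.length : Int) / 2 + 1) (b.length : Int) 1) = false then false
    else picoOuterA b is

def pico (b : List Int) : Bool :=
  picoOuterA b (PySem.List.pyRange 1 ((b.length : Int) / 2 + 1) 1)

-- ===== PORT B =====
def picoAscB (b : List Int) : List Int → Bool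
  | [] => true
  | i :: is =>
    if PySem.List.pyGetD b i 0 < PySem.List.pyGetD b (i - 1) 0 then false
    else picoAscB b is

def picoDescB (b : List Int) : List Int → Bool
  | [] => true
  | j :: js =>
    if PySem.List.pyGetD b j 0 > PySem.List.pyGetD b (j - 1) 0 then false
    else picoDescB b js

def pico_alt (b : List Int) : Bool :=
  picoAscB b (PySem.List.pyRange 1 ((b.length : Int) / 2 + 1) 1) &&
  picoDescB b (PySem.List.pyRange ((b.length : Int) / 2 + 1) (b.length : Int) 1)

-- ===== PRECONDITION & SPEC =====
def Spec_pico (b : List Int) (out : Bool) : Prop := out = pico_alt b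
instance (b : List Int) (out : Bool) : Decidable (Spec_pico b out) := by unfold Spec_pico; infer_instance

-- ===== CLAIM (what is proved, stated in full; the proofs are below) =====
def Claim_equal_pico : Prop := ∀ (b : List Int), Dom_pico b → Spec_pico b (pico b)

-- ===== LEMMAS AND PROOFS =====
theorem picoInnerA_eq_desc (b : List Int) (js : List Int) :
    picoInnerA b js = picoDescB b js := by
  induction js with
  | nil => rfl
  | cons j js ih => simp [picoInnerA, picoDescB, ih]

theorem picoOuterA_eq (b : List Int) (is : List Int) :
    picoOuterA b is =
      (picoAscB b is &&
        (is.isEmpty || picoDescB b (PySem.List.pyRange ((b.length : Int) / 2 + 1) (b.length : Int) 1))) := by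
  induction is with
  | nil => rfl
  | cons i is ih =>
    simp only [picoOuterA, picoAscB, picoInnerA_eq_desc, List.isEmpty_cons]
    by_cases h : PySem.List.pyGetD b i 0 < PySem.List.pyGetD b (i - 1) 0
    · simp [h]
    · simp only [if_neg h, ih]
      cases hd : picoDescB b (PySem.List.pyRange ((b.length : Int) / 2 + 1) (b.length : Int) 1) <;>
        cases picoAscB b is <;> simp

-- ===== VERDICT (by name: the statement is the Claim_ definition above) =====
theorem pico_spec : Claim_equal_pico := by
  intro b _
  unfold Spec_pico pico pico_alt
  rw [picoOuterA_eq]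
  by_cases h : b.length ≤ 1
  · have h1 : ((b.length : Int) / 2 + 1) ≤ 1 := by interval_cases hl : b.length <;> decide
    rw [PySem.List.pyRange_one_eq_nil h1,
        PySem.List.pyRange_one_eq_nil (by omega : (b.length : Int) ≤ (b.length : Int) / 2 + 1)]
    rfl
  · have h2 : (1 : Int) < (b.length : Int) / 2 + 1 := by omega
    rw [PySem.List.pyRange_one_cons h2]
    simp
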